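-- pv_equiv track=rewrite | github.com/zvizdo/smart-travel-buddy-app | shared/shared/dag/assembler.py | _handle_circular_route
-- ===== SOURCE A (Python) =====
-- def _handle_circular_route(locations: list[dict]) -> list[dict]:
--     """Detect and handle return-to-origin routes.
--
--     If the last spine location shares a name with the first spine location,
--     rename it with a ' (return)' suffix to create a distinct A' node and
--     preserve the acyclic DAG property.
--     """
--     if len(locations) < 2:
--         return locations
--
--     # Only compare spine locations (no branch_group)
--     spine = [loc for loc in locations if not loc.get("branch_group")]
--     if len(spine) < 2:
--         return locations
--
--     first_name = spine[0].get("name", "").lower().strip()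
--     last_name = spine[-1].get("name", "").lower().strip()
--
--     if first_name and first_name == last_name:
--         # Make a copy so we don't mutate the input
--         locations = [dict(loc) for loc in locations]
--         # Find and rename the last spine location in the full list
--         last_spine_loc = spine[-1]
--         for i in range(len(locations) - 1, -1, -1):
--             if locations[i] is last_spine_loc or (
--                 locations[i].get("name", "").lower().strip() == last_name
--                 and not locations[i].get("branch_group")
--                 and i > 0
--             ):
--                 locations[i] = dict(locations[i])
--                 locations[i]["name"] = f"{locations[i]['name']} (return)"
--                 break
--
--     return locations
-- ===== SOURCE B (Python) =====
-- def _handle_circular_route(locations: list[dict]) -> list[dict]: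
--     """Rename the last spine location with a ' (return)' suffix when it
--     shares its (case/space-insensitive) name with the first spine location.
--
--     One enumerate pass builds the spine index table; the rename then happens
--     by direct indexing instead of a reverse scan.
--     """
--     idx = [i for i, loc in enumerate(locations) if not loc.get("branch_group")]
--     if len(locations) < 2 or len(idx) < 2:
--         return locations
--     first = locations[idx[0]].get("name", "").lower().strip()
--     last = locations[idx[-1]].get("name", "").lower().strip()
--     if not first or first != last:
--         return locations
--     result = [dict(loc) for loc in locations]
--     j = idx[-1]
--     result[j] = dict(result[j])
--     result[j]["name"] = f"{result[j]['name']} (return)"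
--     return result
-- ===== Notes on version B (the rewrite author's own statement) =====
-- stated objective: simpler
-- what changed: B builds the spine index table in one enumerate pass and renames directly at the last spine index by O(1) indexing, replacing A's filter-then-reverse-scan with its identity/name-match search loop.
import Mathlib
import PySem

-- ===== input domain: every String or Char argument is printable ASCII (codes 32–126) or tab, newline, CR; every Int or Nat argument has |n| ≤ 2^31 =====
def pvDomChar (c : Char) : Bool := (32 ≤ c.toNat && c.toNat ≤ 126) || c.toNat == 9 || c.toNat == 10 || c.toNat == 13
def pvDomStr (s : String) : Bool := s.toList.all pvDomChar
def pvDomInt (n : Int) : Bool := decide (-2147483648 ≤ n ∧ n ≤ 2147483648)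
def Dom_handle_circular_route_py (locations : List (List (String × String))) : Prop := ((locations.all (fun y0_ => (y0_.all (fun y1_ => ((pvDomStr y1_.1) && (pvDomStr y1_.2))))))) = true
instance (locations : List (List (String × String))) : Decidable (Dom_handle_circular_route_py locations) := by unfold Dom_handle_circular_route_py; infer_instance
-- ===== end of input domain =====

-- B replaces A's filter-then-reverse-scan with one enumerate pass building a spine index
-- table and a direct O(1) rename at the last spine index (objective: simpler decomposition).


-- Shared dict-access primitives (the same Python expressions occur in both sources):
-- loc.get("name", ""), `not loc.get("branch_group")`, .lower().strip(), and the rename step.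
def pvName (loc : List (String × String)) : String :=
  PySem.Dict.getD (PySem.Dict.mk loc) "name" ""

-- `not loc.get("branch_group")`: missing key (None) and "" are falsy, any other string truthy
def pvIsSpine (loc : List (String × String)) : Bool :=
  PySem.Dict.getD (PySem.Dict.mk loc) "branch_group" "" == ""

def pvKey (loc : List (String × String)) : String :=
  PySem.Str.strip (PySem.Str.lower (pvName loc))

-- loc = dict(loc); loc["name"] = f"{loc['name']} (return)"   (the 'name' key is present
-- whenever this step is reached: the stripped lowered name equals the nonempty last_name)
def pvRename (loc : List (String × String)) : List (String × String) :=
  (PySem.Dict.insert (PySem.Dict.mk loc) "name" (pvName loc ++ " (return)")).items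

-- ===== PORT A =====
-- `for i in range(len(locations)-1, -1, -1): if <cond>: rename; break`, i the current index.
-- The `locations[i] is last_spine_loc` disjunct is always False: `locations` was rebound to
-- fresh dict copies just before the loop, so only the name/branch_group/i>0 disjunct remains;
-- at i = 0 that disjunct's `i > 0` fails, so the loop ends without renaming.
def pvScanA (locs : List (List (String × String))) (last_name : String) :
    Nat → List (List (String × String))
  | 0 => locs
  | i + 1 =>
    if pvKey (locs.getD (i + 1) []) == last_name && pvIsSpine (locs.getD (i + 1) []) then
      locs.set (i + 1) (pvRename (locs.getD (i + 1) []))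
    else
      pvScanA locs last_name i

def handle_circular_route_py (locations : List (List (String × String))) :
    List (List (String × String)) :=
  if locations.length < 2 then locations
  else
    let spine := locations.filter pvIsSpine
    if spine.length < 2 then locations
    else
      let first_name := pvKey (spine.headD [])      -- spine[0]
      let last_name := pvKey (spine.getLastD [])    -- spine[-1]
      if first_name != "" && first_name == last_name then
        -- locations = [dict(loc) for loc in locations] copies the same values
        pvScanA locations last_name (locations.length - 1)
      else locations

-- ===== PORT B =====
def handle_circular_route_py_alt (locations : List (List (String × String))) :
    List (List (String × String)) :=
  let idx := ((PySem.List.enumerate locations 0).filter (fun pr => pvIsSpine pr.2)).map (·.1)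
  if locations.length < 2 || idx.length < 2 then locations
  else
    let first := pvKey (locations.getD (idx.headD 0).toNat [])      -- locations[idx[0]]
    let last := pvKey (locations.getD (idx.getLastD 0).toNat [])    -- locations[idx[-1]]
    if first == "" || first != last then locations
    else
      let j := (idx.getLastD 0).toNat
      locations.set j (pvRename (locations.getD j []))

-- ===== PRECONDITION & SPEC =====
def Spec_handle_circular_route_py (locations : List (List (String × String))) (out : List (List (String × String))) : Prop := out = handle_circular_route_py_alt locations
instance (locations : List (List (String × String))) (out : List (List (String × String))) : Decidable (Spec_handle_circular_route_py locations out) := by unfold Spec_handle_circular_route_py; infer_instance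

-- ===== CLAIM (what is proved, stated in full; the proofs are below) =====
def Claim_equal_handle_circular_route_py : Prop := ∀ (locations : List (List (String × String))), Dom_handle_circular_route_py locations → Spec_handle_circular_route_py locations (handle_circular_route_py locations)

-- ===== LEMMAS AND PROOFS =====

-- The spine index table, as Nats (proof-side mirror of B's idx)
def sidx : List (List (String × String)) → List Nat
  | [] => []
  | x :: t => if pvIsSpine x then 0 :: (sidx t).map (· + 1) else (sidx t).map (· + 1)

theorem idx_eq_sidx (l : List (List (String × String))) (s : Int) :
    ((PySem.List.enumerate l s).filter (fun pr => pvIsSpine pr.2)).map (·.1)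
      = (sidx l).map (fun k : Nat => s + (k : Int)) := by
  induction l generalizing s with
  | nil => simp [PySem.List.enumerate_nil, sidx]
  | cons x t ih =>
    rw [PySem.List.enumerate_cons]
    have hmaps : ((sidx t).map (· + 1)).map (fun k : Nat => s + (k : Int))
        = (sidx t).map (fun k : Nat => (s + 1) + (k : Int)) := by
      rw [List.map_map]
      apply List.map_congr_left
      intro k _
      simp only [Function.comp_apply]
      push_cast
      ring
    by_cases h : pvIsSpine x
    · rw [List.filter_cons_of_pos (by simpa using h), List.map_cons, ih]
      simp only [sidx, if_pos h, List.map_cons, hmaps]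
      simp
    · rw [List.filter_cons_of_neg (by simpa using h), ih]
      simp only [sidx, if_neg h, hmaps]

theorem sidx_map_getD (l : List (List (String × String))) :
    (sidx l).map (fun k => l.getD k []) = l.filter pvIsSpine := by
  induction l with
  | nil => simp [sidx]
  | cons x t ih =>
    have hmaps : ((sidx t).map (· + 1)).map (fun k => (x :: t).getD k [])
        = (sidx t).map (fun k => t.getD k []) := by
      rw [List.map_map]
      apply List.map_congr_left
      intro k _
      simp
    by_cases h : pvIsSpine x
    · rw [List.filter_cons_of_pos (by simpa using h), ← ih]
      simp only [sidx, if_pos h, List.map_cons, List.getD_cons_zero, hmaps]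
    · rw [List.filter_cons_of_neg (by simpa using h), ← ih]
      simp only [sidx, if_neg h, hmaps]

theorem sidx_mem (l : List (List (String × String))) (k : Nat) (hk : k ∈ sidx l) :
    k < l.length ∧ pvIsSpine (l.getD k []) = true := by
  induction l generalizing k with
  | nil => simp [sidx] at hk
  | cons x t ih =>
    by_cases h : pvIsSpine x <;> simp only [sidx, h] at hk
    · rcases List.mem_cons.mp hk with rfl | hk'
      · exact ⟨by simp, by simpa using h⟩
      · rcases List.mem_map.mp hk' with ⟨m, hm, rfl⟩
        rcases ih m hm with ⟨h1, h2⟩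
        exact ⟨by simpa using h1, by simpa using h2⟩
    · simp at hk
      rcases hk with ⟨m, hm, rfl⟩
      rcases ih m hm with ⟨h1, h2⟩
      exact ⟨by simpa using h1, by simpa using h2⟩

theorem sidx_complete (l : List (List (String × String))) (k : Nat)
    (hk : k < l.length) (hq : pvIsSpine (l.getD k []) = true) : k ∈ sidx l := by
  induction l generalizing k with
  | nil => simp at hk
  | cons x t ih =>
    cases k with
    | zero =>
      simp only [List.getD_cons_zero] at hq
      simp [sidx, hq]
    | succ m =>
      have hm : m ∈ sidx t := ih m (by simpa using hk) (by simpa using hq)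
      by_cases h : pvIsSpine x
      · simp only [sidx, if_pos h, List.mem_cons]
        exact Or.inr (List.mem_map.mpr ⟨m, hm, rfl⟩)
      · simp only [sidx, if_neg h]
        exact List.mem_map.mpr ⟨m, hm, rfl⟩

theorem sidx_pairwise (l : List (List (String × String))) : (sidx l).Pairwise (· < ·) := by
  induction l with
  | nil => simp [sidx]
  | cons x t ih =>
    have hmap : ((sidx t).map (· + 1)).Pairwise (· < ·) := by
      rw [List.pairwise_map]; exact ih.imp (by omega)
    by_cases h : pvIsSpine x <;> simp only [sidx, h]
    · refine List.pairwise_cons.mpr ⟨?_, hmap⟩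
      intro k hk; rcases List.mem_map.mp hk with ⟨m, _, rfl⟩; omega
    · exact hmap

-- in a (<)-sorted Nat list, every member is at most getLastD
theorem mem_le_getLastD (l : List Nat) (hp : l.Pairwise (· < ·)) :
    ∀ k ∈ l, k ≤ l.getLastD 0 := by
  induction l with
  | nil => simp
  | cons a t ih =>
    intro k hk
    cases t with
    | nil => simp_all
    | cons b u =>
      have h1 := (List.pairwise_cons.mp hp).1
      have h2 := (List.pairwise_cons.mp hp).2
      have hlast : (a :: b :: u).getLastD 0 = (b :: u).getLastD 0 := by simp
      rw [hlast]
      rcases List.mem_cons.mp hk with rfl | hk'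
      · have hb := ih h2 b (by simp)
        have := h1 b (by simp)
        omega
      · exact ih h2 k hk'

-- headD / getLastD through a map, for nonempty lists
theorem headD_map {α β : Type} (f : α → β) (l : List α) (hl : l ≠ []) (d : α) (d' : β) :
    (l.map f).headD d' = f (l.headD d) := by
  cases l with
  | nil => exact absurd rfl hl
  | cons a t => simp

theorem getLastD_map {α β : Type} (f : α → β) (l : List α) (hl : l ≠ []) (d : α) (d' : β) :
    (l.map f).getLastD d' = f (l.getLastD d) := by
  have hml : l.map f ≠ [] := by simp [hl]
  rw [List.getLastD_eq_getLast?, List.getLast?_eq_some_getLast hml,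
    List.getLastD_eq_getLast?, List.getLast?_eq_some_getLast hl]
  simp [List.getLast_map]

-- A's reverse scan stops exactly at j when the condition holds at j and fails above j
theorem pvScanA_eq_set (locs : List (List (String × String))) (ln : String) (j i : Nat)
    (hj1 : 1 ≤ j) (hji : j ≤ i)
    (hcond : (pvKey (locs.getD j []) == ln && pvIsSpine (locs.getD j [])) = true)
    (habove : ∀ k, j < k → k ≤ i →
      (pvKey (locs.getD k []) == ln && pvIsSpine (locs.getD k [])) = false) :
    pvScanA locs ln i = locs.set j (pvRename (locs.getD j [])) := by
  induction i with
  | zero => omega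
  | succ m ih =>
    by_cases hji' : j = m + 1
    · subst hji'
      simp only [pvScanA]
      rw [if_pos hcond]
    · have hlt : j ≤ m := by omega
      have hfalse := habove (m + 1) (by omega) (by omega)
      simp only [pvScanA]
      rw [if_neg (by rw [hfalse]; exact Bool.false_ne_true)]
      exact ih hlt (fun k h1 h2 => habove k h1 (by omega))

-- ===== VERDICT (by name: the statement is the Claim_ definition above) =====
theorem handle_circular_route_py_spec : Claim_equal_handle_circular_route_py := by
  unfold Claim_equal_handle_circular_route_py
  intro l _
  unfold Spec_handle_circular_route_py handle_circular_route_py handle_circular_route_py_alt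
  have hidx : ((PySem.List.enumerate l 0).filter (fun pr => pvIsSpine pr.2)).map (·.1)
      = (sidx l).map (fun k : Nat => (k : Int)) := by
    simpa using idx_eq_sidx l 0
  simp only [hidx]
  have hlenf : (l.filter pvIsSpine).length = (sidx l).length := by
    rw [← sidx_map_getD]; simp
  by_cases hlen : l.length < 2
  · simp [hlen]
  · simp only [if_neg hlen]
    by_cases hs : (sidx l).length < 2
    · simp [hlenf, hs, hlen]
    · have hne : sidx l ≠ [] := by
        intro h; rw [h] at hs; simp at hs
      set ks := sidx l with hks
      set f := pvKey (l.getD (ks.headD 0) []) with hf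
      set la := pvKey (l.getD (ks.getLastD 0) []) with hla
      have hheadA : (l.filter pvIsSpine).headD [] = l.getD (ks.headD 0) [] := by
        rw [← sidx_map_getD, headD_map _ _ hne 0]
      have hlastA : (l.filter pvIsSpine).getLastD [] = l.getD (ks.getLastD 0) [] := by
        rw [← sidx_map_getD, getLastD_map _ _ hne 0]
      have hheadB : (((ks.map (fun k : Nat => (k : Int))).headD 0).toNat) = ks.headD 0 := by
        rw [headD_map _ _ hne 0]; simp
      have hlastB : (((ks.map (fun k : Nat => (k : Int))).getLastD 0).toNat) = ks.getLastD 0 := by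
        rw [getLastD_map _ _ hne 0]; simp
      simp only [if_neg hs, hlenf, List.length_map, hheadA, hlastA, hheadB, hlastB,
        ← hf, ← hla]
      by_cases hcond : (f != "" && f == la) = true
      · simp only [bne, Bool.and_eq_true, Bool.not_eq_true'] at hcond
        have hfla : f = la := by simpa using hcond.2
        have hfne : f ≠ "" := by simpa using hcond.1
        have hc' : (f == "" || f != la) = false := by rw [← hfla]; simp [hfne]
        have hcond' : (f != "" && f == la) = true := by rw [← hfla]; simp [hfne]
        rw [if_pos hcond']
        rw [if_neg (show ¬((decide (l.length < 2) || decide (ks.length < 2)) = true) by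
          simp [hlen, hs])]
        rw [if_neg (by rw [hc']; exact Bool.false_ne_true)]
        -- the rename branch: A's reverse scan stops exactly at the last spine index
        set j := ks.getLastD 0 with hj
        have hjmem : j ∈ ks := by
          rw [hj, List.getLastD_eq_getLast?, List.getLast?_eq_some_getLast hne]
          simp only [Option.getD_some]
          exact List.getLast_mem hne
        obtain ⟨hjlt, hjspine⟩ := sidx_mem l j hjmem
        have hjspine' : pvIsSpine (l[j]?.getD []) = true := by
          simpa [List.getD_eq_getElem?_getD] using hjspine
        have hpw := sidx_pairwise l
        rw [← hks] at hpw
        have hj1 : 1 ≤ j := by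
          obtain ⟨a, t, hket⟩ := List.exists_cons_of_ne_nil hne
          rw [hket] at hs hj
          rw [hket] at hpw
          cases t with
          | nil => simp at hs
          | cons b u =>
            have hab : a < b := (List.pairwise_cons.mp hpw).1 b (by simp)
            have hble : b ≤ (b :: u).getLastD 0 :=
              mem_le_getLastD _ (List.pairwise_cons.mp hpw).2 b (by simp)
            have hcc : (a :: b :: u).getLastD 0 = (b :: u).getLastD 0 := by simp
            omega
        apply pvScanA_eq_set l la j (l.length - 1) hj1 (by omega)
        · simp [hla, hjspine']
        · intro k hk1 hk2
          have hbg : pvIsSpine (l.getD k []) = false := by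
            by_contra hb
            have hb' : pvIsSpine (l.getD k []) = true := by
              cases h : pvIsSpine (l.getD k []) <;> simp_all
            have hkmem := sidx_complete l k (by omega) hb'
            have := mem_le_getLastD ks hpw k (by rwa [hks])
            omega
          have hbg' : pvIsSpine (l[k]?.getD []) = false := by
            simpa [List.getD_eq_getElem?_getD] using hbg
          simp [hbg']
      · have hc' : (f == "" || f != la) = true := by
          cases h1 : (f == "") <;> cases h2 : (f == la) <;> simp_all [bne]
        rw [if_neg (by simpa using hcond)]
        rw [if_neg (show ¬((decide (l.length < 2) || decide (ks.length < 2)) = true) by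
          simp [hlen, hs])]
        rw [if_pos hc']
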